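-- pv_equiv track=rewrite | github.com/microsoft/LLMLingua | experiments/llmlingua2/evaluation/eval_gsm8k.py | extract_ans
-- ===== SOURCE A (Python) =====
-- def extract_ans(ans_model):
--     ans_model = ans_model.split("\n")
--     ans = []
--     residual = []
--     for li, al in enumerate(ans_model):
--         ans.append(al)
--         if "answer is" in al:
--             break
--     residual = list(ans_model[li + 1 :])
--     ans = "\n".join(ans)
--     residual = "\n".join(residual)
--     return ans, residual
-- ===== SOURCE B (Python) =====
-- def extract_ans(ans_model):
--     pos = ans_model.find("answer is")
--     if pos == -1:
--         return ans_model, ""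
--     nl = ans_model.find("\n", pos)
--     if nl == -1:
--         return ans_model, ""
--     return ans_model[:nl], ans_model[nl + 1:]
-- ===== Notes on version B (the rewrite author's own statement) =====
-- stated objective: simpler
-- what changed: Replaces split-into-lines + accumulate-with-break loop + two joins by two direct find calls (position of 'answer is', then the newline ending that line) and a single pair of slices.
import Mathlib
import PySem

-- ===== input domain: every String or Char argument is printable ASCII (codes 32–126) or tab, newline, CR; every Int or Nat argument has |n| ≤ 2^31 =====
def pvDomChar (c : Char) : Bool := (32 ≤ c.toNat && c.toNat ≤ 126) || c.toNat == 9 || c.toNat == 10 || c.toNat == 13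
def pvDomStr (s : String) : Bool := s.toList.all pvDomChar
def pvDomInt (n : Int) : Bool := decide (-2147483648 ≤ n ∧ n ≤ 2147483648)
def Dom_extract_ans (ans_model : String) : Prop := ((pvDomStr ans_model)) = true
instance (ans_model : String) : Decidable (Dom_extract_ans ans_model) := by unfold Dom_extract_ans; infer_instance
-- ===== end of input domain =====

-- B replaces A's split-into-lines + accumulate-with-break loop + two joins by two
-- direct find calls and one pair of slices (objective: simpler).

-- ===== PORT A =====
-- A's for-loop with enumerate and break: returns the collected lines (in order) and
-- the final value of li.  On the empty line list Python's li would be unbound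
-- (NameError); split("\n") always yields a nonempty list, so that branch is
-- unreachable (its result is never exercised).
def extractAnsLoop (lines : List String) (li : Nat) (ans : List String) : List String × Nat :=
  match lines with
  | [] => (ans.reverse, li - 1)
  | al :: rest =>
    if PySem.Str.isIn "answer is" al then ((al :: ans).reverse, li)
    else extractAnsLoop rest (li + 1) (al :: ans)

def extract_ans (ans_model : String) : String × String :=
  let lines := (PySem.Str.split? ans_model "\n").getD []
  let la := extractAnsLoop lines 0 []
  let residual := PySem.List.slice lines (some ((la.2 : Int) + 1)) none
  (PySem.Str.join "\n" la.1, PySem.Str.join "\n" residual)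


-- ===== PORT B =====
def extract_ans_alt (ans_model : String) : String × String :=
  let pos := PySem.Str.find ans_model "answer is"
  if pos = -1 then (ans_model, "")
  else
    let nl := PySem.Str.findFrom ans_model "\n" pos
    if nl = -1 then (ans_model, "")
    else (PySem.Str.slice ans_model none (some nl), PySem.Str.slice ans_model (some (nl + 1)) none)


-- ===== PRECONDITION & SPEC =====
def Spec_extract_ans (ans_model : String) (out : String × String) : Prop := out = extract_ans_alt ans_model
instance (ans_model : String) (out : String × String) : Decidable (Spec_extract_ans ans_model out) := by unfold Spec_extract_ans; infer_instance

-- ===== CLAIM (what is proved, stated in full; the proofs are below) =====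
def Claim_equal_extract_ans : Prop := ∀ (ans_model : String), Dom_extract_ans ans_model → Spec_extract_ans ans_model (extract_ans ans_model)

-- ===== LEMMAS AND PROOFS =====

def linesOf : List Char → List (List Char)
  | [] => [[]]
  | c :: r => if c = '\n' then [] :: linesOf r
              else match linesOf r with
                   | [] => [[c]]
                   | h :: t => (c :: h) :: t

theorem linesOf_ne_nil (cs : List Char) : linesOf cs ≠ [] := by
  match cs with
  | [] => simp [linesOf]
  | c :: r =>
    simp only [linesOf]
    split
    · simp
    · split <;> simp

def consH (p : List Char) : List (List Char) → List (List Char)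
  | [] => [p]
  | h :: t => (p ++ h) :: t

theorem splitOn_go_eq (fuel : Nat) (cs cur : List Char) (acc : List (List Char))
    (hf : cs.length ≤ fuel) :
    PySem.Chars.splitOn.go ['\n'] fuel cs cur acc = acc.reverse ++ consH cur.reverse (linesOf cs) := by
  induction fuel generalizing cs cur acc with
  | zero =>
    have : cs = [] := by simpa using hf
    subst this
    rw [PySem.Chars.splitOn.go]
    simp [linesOf, consH]
  | succ fuel ih =>
    match cs with
    | [] =>
      rw [PySem.Chars.splitOn.go]
      simp [linesOf, consH]
      omega
    | c :: r =>
      rw [PySem.Chars.splitOn.go]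
      by_cases hc : c = '\n'
      · subst hc
        simp only [List.isPrefixOf, Bool.and_true, beq_self_eq_true, if_pos,
          List.length_cons, List.length_nil, List.drop_succ_cons, List.drop_zero]
        rw [ih r [] (cur.reverse :: acc) (by simpa using Nat.le_of_succ_le_succ hf)]
        simp only [linesOf]
        obtain ⟨h, t, hht⟩ : ∃ h t, linesOf r = h :: t := by
          cases hl : linesOf r with
          | nil => exact absurd hl (linesOf_ne_nil r)
          | cons h t => exact ⟨h, t, rfl⟩
        simp [hht, consH]
      · have hpre : (['\n'].isPrefixOf (c :: r)) = false := by
          simp [List.isPrefixOf]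
          exact fun h => absurd h.symm hc
        simp only [hpre, Bool.false_eq_true, if_false]
        rw [ih r (c :: cur) acc (by simpa using Nat.le_of_succ_le_succ hf)]
        simp only [linesOf, if_neg hc]
        obtain ⟨h, t, hht⟩ : ∃ h t, linesOf r = h :: t := by
          cases hl : linesOf r with
          | nil => exact absurd hl (linesOf_ne_nil r)
          | cons h t => exact ⟨h, t, rfl⟩
        simp [hht, consH]

theorem splitOn_eq_linesOf (cs : List Char) : PySem.Chars.splitOn cs ['\n'] = linesOf cs := by
  rw [PySem.Chars.splitOn, splitOn_go_eq _ _ _ _ (by omega)]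
  obtain ⟨h, t, hht⟩ : ∃ h t, linesOf cs = h :: t := by
    cases hl : linesOf cs with
    | nil => exact absurd hl (linesOf_ne_nil cs)
    | cons h t => exact ⟨h, t, rfl⟩
  simp [hht, consH]

theorem exists_lines (cs : List Char) : ∃ h t, linesOf cs = h :: t := by
  cases hl : linesOf cs with
  | nil => exact absurd hl (linesOf_ne_nil cs)
  | cons h t => exact ⟨h, t, rfl⟩

theorem join_cons (x : List Char) (xs : List (List Char)) :
    PySem.Chars.join ['\n'] (x :: xs) = x ++ (match xs with | [] => [] | _ :: _ => '\n' :: PySem.Chars.join ['\n'] xs) := by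
  cases xs with
  | nil => simp [PySem.Chars.join_singleton]
  | cons y ys => rw [PySem.Chars.join_cons_cons]; simp

theorem join_linesOf (cs : List Char) : PySem.Chars.join ['\n'] (linesOf cs) = cs := by
  induction cs with
  | nil => simp [linesOf, PySem.Chars.join_singleton]
  | cons c r ih =>
    by_cases hc : c = '\n'
    · subst hc
      obtain ⟨h, t, hht⟩ := exists_lines r
      have hstep : linesOf ('\n' :: r) = [] :: linesOf r := by simp [linesOf]
      have ih' : PySem.Chars.join ['\n'] (h :: t) = r := by rw [← hht]; exact ih
      rw [hstep, hht, join_cons]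
      simp [ih']
    · obtain ⟨h, t, hht⟩ := exists_lines r
      have hstep : linesOf (c :: r) = (c :: h) :: t := by simp [linesOf, hc, hht]
      rw [hstep]
      rw [hht, join_cons] at ih
      rw [join_cons]
      cases t <;> simp_all

theorem lines_head_no_nl (cs : List Char) (h : List Char) (ht : List (List Char))
    (hl : linesOf cs = h :: ht) : '\n' ∉ h := by
  induction cs generalizing h ht with
  | nil => simp [linesOf] at hl; simp [hl.1]
  | cons c r ih =>
    by_cases hc : c = '\n'
    · subst hc
      have hstep : linesOf ('\n' :: r) = [] :: linesOf r := by simp [linesOf]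
      rw [hstep] at hl
      simp only [List.cons.injEq] at hl
      simp [← hl.1]
    · obtain ⟨h', t', hht⟩ := exists_lines r
      have hstep : linesOf (c :: r) = (c :: h') :: t' := by simp [linesOf, hc, hht]
      rw [hstep] at hl
      simp only [List.cons.injEq] at hl
      have := ih h' t' hht
      rw [← hl.1]
      simp [this]
      exact fun e => hc e.symm

-- find: go shift and cons characterization
theorem find_go_shift (sub l : List Char) (k : Nat) :
    PySem.Chars.find.go sub l k =
      if PySem.Chars.find l sub = -1 then -1 else k + PySem.Chars.find l sub := by
  induction l generalizing k with
  | nil =>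
    rw [PySem.Chars.find, PySem.Chars.find.go, PySem.Chars.find.go]
    by_cases he : sub.isEmpty <;> simp [he]
  | cons c r ih =>
    rw [PySem.Chars.find, PySem.Chars.find.go]
    conv_rhs => rw [PySem.Chars.find.go]
    by_cases hp : sub.isPrefixOf (c :: r)
    · simp [hp]
    · simp only [hp, Bool.false_eq_true, if_false]
      have hle := PySem.Chars.neg_one_le_find r sub
      rw [ih (k+1), ih 1]
      split_ifs with h1 h2 h3 <;> omega

theorem find_cons (sub : List Char) (c : Char) (r : List Char) :
    PySem.Chars.find (c :: r) sub =
      if sub.isPrefixOf (c :: r) then 0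
      else if PySem.Chars.find r sub = -1 then -1 else 1 + PySem.Chars.find r sub := by
  rw [PySem.Chars.find, PySem.Chars.find.go]
  by_cases hp : sub.isPrefixOf (c :: r)
  · simp [hp]
  · simp only [hp, Bool.false_eq_true, if_false]
    rw [find_go_shift]
    simp

theorem find_nil (sub : List Char) (hne : sub ≠ []) : PySem.Chars.find [] sub = -1 := by
  rw [PySem.Chars.find, PySem.Chars.find.go]
  simp [List.isEmpty_iff, hne]

theorem isIn_nil (sub : List Char) (hne : sub ≠ []) : PySem.Chars.isIn sub [] = false := by
  rw [PySem.Chars.isIn, find_nil sub hne]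
  simp

theorem infix_singleton_iff (x : Char) (l : List Char) : [x] <:+: l ↔ x ∈ l := by
  constructor
  · rintro ⟨s, t, rfl⟩; simp
  · intro hm
    obtain ⟨s, t, rfl⟩ := List.append_of_mem hm
    exact ⟨s, t, by simp⟩

theorem find_no_nl (a : List Char) (ha : '\n' ∉ a) : PySem.Chars.find a ['\n'] = -1 := by
  rw [PySem.Chars.find_eq_neg_one_iff, infix_singleton_iff]
  exact ha

theorem find_nl (a z : List Char) (ha : '\n' ∉ a) :
    PySem.Chars.find (a ++ '\n' :: z) ['\n'] = a.length := by
  induction a with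
  | nil =>
    rw [List.nil_append, find_cons]
    simp [List.isPrefixOf]
  | cons x a' ih =>
    have hx : x ≠ '\n' := by intro e; exact ha (e ▸ List.mem_cons_self)
    have ha' : '\n' ∉ a' := fun h => ha (List.mem_cons_of_mem _ h)
    rw [List.cons_append, find_cons]
    have hp : (['\n'].isPrefixOf (x :: (a' ++ '\n' :: z))) = false := by
      simp [List.isPrefixOf]
      exact fun e => hx e.symm
    rw [ih ha'] at *
    simp only [hp, Bool.false_eq_true, if_false]
    have : ((a'.length : Int)) ≠ -1 := by omega
    simp [this]
    omega

-- prefix with no newline stays in the first segment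
theorem prefix_no_nl (sub h z : List Char) (hnl : '\n' ∉ sub)
    (hp : sub <+: h ++ '\n' :: z) : sub <+: h := by
  by_cases hlen : sub.length ≤ h.length
  · have heq := List.prefix_iff_eq_take.1 hp
    rw [List.take_append_of_le_length hlen] at heq
    rw [heq]
    exact List.take_prefix _ _
  · exfalso
    -- h ++ ['\n'] is then a prefix of sub, so '\n' ∈ sub
    obtain ⟨t, hht⟩ := hp
    apply hnl
    have : sub.length ≥ h.length + 1 := by omega
    have hg : sub[h.length]? = some '\n' := by
      have : (sub ++ t)[h.length]? = some '\n' := by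
        rw [hht]; simp
      rwa [List.getElem?_append_left (by omega)] at this
    exact List.mem_of_getElem? hg

def takeRes (sub : List Char) : List (List Char) → List (List Char) × List (List Char)
  | [] => ([], [])
  | l :: ls => if PySem.Chars.isIn sub l then ([l], ls)
               else ((l :: (takeRes sub ls).1), (takeRes sub ls).2)

def bcore (sub cs : List Char) : List Char × List Char :=
  let p := PySem.Chars.find cs sub
  if p = -1 then (cs, [])
  else
    let q := PySem.Chars.findFrom cs ['\n'] p
    if q = -1 then (cs, [])
    else (cs.take q.toNat, cs.drop (q.toNat + 1))

def acore (sub cs : List Char) : List Char × List Char :=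
  (PySem.Chars.join ['\n'] (takeRes sub (linesOf cs)).1,
   PySem.Chars.join ['\n'] (takeRes sub (linesOf cs)).2)

theorem cs_eq_nil (cs h : List Char) (hl : linesOf cs = [h]) : cs = h := by
  rw [← join_linesOf cs, hl, PySem.Chars.join_singleton]

theorem cs_eq_cons (cs h t0 : List Char) (ts : List (List Char))
    (hl : linesOf cs = h :: t0 :: ts) : cs = h ++ '\n' :: PySem.Chars.join ['\n'] (t0 :: ts) := by
  rw [← join_linesOf cs, hl, PySem.Chars.join_cons_cons]
  simp

theorem head_prefix (cs h : List Char) (t : List (List Char)) (hl : linesOf cs = h :: t) :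
    h <+: cs := by
  cases t with
  | nil => rw [cs_eq_nil cs h hl]
  | cons t0 ts => rw [cs_eq_cons cs h t0 ts hl]; exact List.prefix_append _ _

theorem takeRes_fst_cons (sub l : List Char) (ls : List (List Char)) :
    ∃ x xs, (takeRes sub (l :: ls)).1 = x :: xs := by
  rw [takeRes]
  split <;> exact ⟨_, _, rfl⟩

theorem acore_cons (sub : List Char) (hne : sub ≠ []) (c : Char) (r : List Char)
    (hp : sub.isPrefixOf (c :: r) = false) :
    acore sub (c :: r) = (c :: (acore sub r).1, (acore sub r).2) := by
  obtain ⟨h, t, hht⟩ := exists_lines r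
  by_cases hc : c = '\n'
  · subst hc
    have hstep : linesOf ('\n' :: r) = [] :: linesOf r := by simp [linesOf]
    unfold acore
    rw [hstep, hht]
    rw [takeRes]
    rw [isIn_nil sub hne]
    simp only [Bool.false_eq_true, if_false]
    obtain ⟨x, xs, hx⟩ := takeRes_fst_cons sub h t
    rw [hx, join_cons]
    simp
  · have hstep : linesOf (c :: r) = (c :: h) :: t := by simp [linesOf, hc, hht]
    have hpr : ¬ sub <+: (c :: h) := by
      intro hsp
      have h1 : h <+: r := head_prefix r h t hht
      have h2 : (c :: h) <+: (c :: r) := (List.prefix_cons_inj c).mpr h1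
      have := hsp.trans h2
      rw [← List.isPrefixOf_iff_prefix] at this
      simp [this] at hp
    have hIs : PySem.Chars.isIn sub (c :: h) = PySem.Chars.isIn sub h := by
      cases hih : PySem.Chars.isIn sub h with
      | true =>
        rw [PySem.Chars.isIn_iff_infix] at hih ⊢
        exact List.infix_cons_iff.2 (Or.inr hih)
      | false =>
        rw [PySem.Chars.isIn_eq_false_iff] at hih ⊢
        intro hin
        rcases List.infix_cons_iff.1 hin with h' | h'
        · exact hpr h'
        · exact hih h'
    unfold acore
    rw [hstep, hht, takeRes, takeRes, hIs]
    cases hih : PySem.Chars.isIn sub h with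
    | true =>
      simp only [if_pos]
      rw [PySem.Chars.join_singleton, PySem.Chars.join_singleton]
    | false =>
      simp only [Bool.false_eq_true, if_false]
      cases hxs : (takeRes sub t).1 with
      | nil => simp
      | cons y ys =>
        simp only [join_cons, PySem.Chars.join_cons_cons]
        simp

theorem bcore_cons (sub : List Char) (c : Char) (r : List Char)
    (hp : sub.isPrefixOf (c :: r) = false) :
    bcore sub (c :: r) = (c :: (bcore sub r).1, (bcore sub r).2) := by
  unfold bcore
  rw [find_cons]
  simp only [hp, Bool.false_eq_true, if_false]
  by_cases h1 : PySem.Chars.find r sub = -1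
  · simp [h1]
  · have hge : 0 ≤ PySem.Chars.find r sub := by
      have := PySem.Chars.neg_one_le_find r sub; omega
    have hle : PySem.Chars.find r sub ≤ r.length := PySem.Chars.find_le_length r sub
    have hne1 : ¬ (1 + PySem.Chars.find r sub = -1) := by omega
    simp only [h1, if_false, hne1]
    set pr := PySem.Chars.find r sub with hpr
    have e1 : (1 + pr) = ((pr.toNat + 1 : Nat) : Int) := by omega
    have e2 : pr = ((pr.toNat : Nat) : Int) := by omega
    rw [e1, PySem.Chars.findFrom_natCast _ _ _ (by simp; omega)]
    conv_rhs => rw [e2, PySem.Chars.findFrom_natCast _ _ _ (by omega)]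
    have hdrop : List.drop (pr.toNat + 1) (c :: r) = List.drop pr.toNat r := by
      simp [List.drop_succ_cons]
    rw [hdrop]
    set f := PySem.Chars.find (List.drop pr.toNat r) ['\n'] with hf
    by_cases h2 : f = -1
    · simp [h2]
    · have hfge : 0 ≤ f := by
        have := PySem.Chars.neg_one_le_find (List.drop pr.toNat r) ['\n']; omega
      have hq : ¬ ((pr.toNat + 1 : Nat) + f = -1) := by omega
      have hqr : ¬ ((pr.toNat : Nat) + f = -1) := by omega
      simp only [h2, if_false, hq, hqr]
      have htn : ((pr.toNat + 1 : Nat) + f).toNat = ((pr.toNat : Nat) + f).toNat + 1 := by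
        push_cast; omega
      rw [htn]
      rw [List.take_succ_cons, List.drop_succ_cons]

theorem main_acore_bcore (sub : List Char) (hne : sub ≠ []) (hnl : '\n' ∉ sub) :
    ∀ cs : List Char, acore sub cs = bcore sub cs := by
  intro cs
  induction cs with
  | nil =>
    have hl : linesOf [] = [[]] := rfl
    unfold acore bcore
    rw [hl, takeRes, isIn_nil sub hne]
    simp only [Bool.false_eq_true, if_false, takeRes]
    rw [find_nil sub hne]
    simp [PySem.Chars.join_singleton, PySem.Chars.join_nil]
  | cons c r ih =>
    by_cases hp : sub.isPrefixOf (c :: r)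
    · -- sub is a prefix: the match is on the first line
      obtain ⟨L1, T, hl⟩ := exists_lines (c :: r)
      have hnoNL : '\n' ∉ L1 := lines_head_no_nl _ _ _ hl
      have hpre : sub <+: (c :: r) := List.isPrefixOf_iff_prefix.1 hp
      have hfind0 : PySem.Chars.find (c :: r) sub = 0 := by
        rw [find_cons]; simp [hp]
      have hsubL1 : sub <+: L1 := by
        cases T with
        | nil => rw [← cs_eq_nil _ _ hl]; exact hpre
        | cons t0 ts =>
          exact prefix_no_nl sub L1 _ hnl (by rw [← cs_eq_cons _ _ _ _ hl]; exact hpre)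
      have hIs : PySem.Chars.isIn sub L1 = true :=
        (PySem.Chars.isIn_iff_infix sub L1).2 hsubL1.isInfix
      unfold acore bcore
      rw [hl, takeRes, hIs]
      simp only [if_pos]
      rw [hfind0]
      have h0 : ¬ ((0:Int) = -1) := by omega
      simp only [h0, if_false]
      rw [PySem.Chars.findFrom_zero]
      cases T with
      | nil =>
        have hcs : c :: r = L1 := cs_eq_nil _ _ hl
        rw [← hcs] at hnoNL
        rw [find_no_nl _ hnoNL]
        simp [PySem.Chars.join_singleton, PySem.Chars.join_nil, hcs]
      | cons t0 ts =>
        have hcs : c :: r = L1 ++ '\n' :: PySem.Chars.join ['\n'] (t0 :: ts) :=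
          cs_eq_cons _ _ _ _ hl
        rw [PySem.Chars.join_singleton]
        conv_rhs => rw [hcs]
        rw [find_nl _ _ hnoNL]
        have hlen : ¬ ((L1.length : Int) = -1) := by omega
        simp only [hlen, if_false]
        have ht : ((L1.length : Int)).toNat = L1.length := by omega
        rw [ht]
        have htake : List.take L1.length (L1 ++ '\n' :: PySem.Chars.join ['\n'] (t0 :: ts)) = L1 :=
          List.take_left
        have hdrop : List.drop (L1.length + 1) (L1 ++ '\n' :: PySem.Chars.join ['\n'] (t0 :: ts)) =
            PySem.Chars.join ['\n'] (t0 :: ts) := by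
          have := List.drop_length_add_append (l₁ := L1) (l₂ := '\n' :: PySem.Chars.join ['\n'] (t0 :: ts)) 1
          rw [Nat.add_comm] at this
          simpa using this
        rw [htake, hdrop]
    · rw [acore_cons sub hne c r (by simp [hp]), bcore_cons sub c r (by simp [hp]), ih]




theorem str_ext (s t : String) (h : s.toList = t.toList) : s = t := by
  rw [← String.ofList_toList (s := s), h, String.ofList_toList]

theorem join_ofList (X : List (List Char)) :
    PySem.Str.join "\n" (X.map String.ofList) = String.ofList (PySem.Chars.join ['\n'] X) := by
  apply str_ext
  rw [PySem.Str.toList_join, List.map_map]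
  have hm : List.map (String.toList ∘ String.ofList) X = X := by
    simp [Function.comp_def]
  rw [hm]
  exact (String.toList_ofList).symm

theorem loopA_char (lns : List (List Char)) (i : Nat) (acc : List String) :
    extractAnsLoop (lns.map String.ofList) i acc =
      (acc.reverse ++ (takeRes ("answer is".toList) lns).1.map String.ofList,
       i + (takeRes ("answer is".toList) lns).1.length - 1) := by
  induction lns generalizing i acc with
  | nil => simp [extractAnsLoop, takeRes]
  | cons l ls ih =>
    rw [List.map_cons, extractAnsLoop]
    have hbr : PySem.Str.isIn "answer is" (String.ofList l)
        = PySem.Chars.isIn ("answer is".toList) l := by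
      simp [PySem.Str.isIn_eq]
    rw [hbr, takeRes]
    cases hIs : PySem.Chars.isIn ("answer is".toList) l with
    | true => simp
    | false =>
      simp only [Bool.false_eq_true, if_false]
      rw [ih]
      simp only [List.map_cons, List.length_cons, Prod.mk.injEq]
      refine ⟨by simp, by omega⟩

theorem takeRes_drop (sub : List Char) (lns : List (List Char)) :
    lns.drop (takeRes sub lns).1.length = (takeRes sub lns).2 := by
  induction lns with
  | nil => simp [takeRes]
  | cons l ls ih =>
    rw [takeRes]
    split
    · simp
    · simp only [List.length_cons, List.drop_succ_cons]
      exact ih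

theorem extract_ans_eq_acore (s : String) :
    extract_ans s = (String.ofList (acore ("answer is".toList) s.toList).1,
                     String.ofList (acore ("answer is".toList) s.toList).2) := by
  unfold extract_ans
  dsimp only
  have hsplit : (PySem.Str.split? s "\n").getD [] = (linesOf s.toList).map String.ofList := by
    rw [PySem.Str.split?]
    have : PySem.Chars.split? s.toList ("\n".toList) = some (linesOf s.toList) := by
      rw [PySem.Chars.split?]
      have h1 : ("\n".toList) = ['\n'] := rfl
      rw [h1]
      simp [splitOn_eq_linesOf]
    rw [this]
    rfl
  rw [hsplit, loopA_char]
  obtain ⟨L1, T, hl⟩ := exists_lines s.toList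
  obtain ⟨x, xs, hx⟩ := takeRes_fst_cons ("answer is".toList) L1 T
  set k := (takeRes ("answer is".toList) (linesOf s.toList)).1.length with hk
  have hk1 : 1 ≤ k := by rw [hk, hl, hx]; simp
  have hslice : PySem.List.slice ((linesOf s.toList).map String.ofList)
      (some (((0 + k - 1 : Nat) : Int) + 1)) none
      = ((takeRes ("answer is".toList) (linesOf s.toList)).2).map String.ofList := by
    have he : (((0 + k - 1 : Nat) : Int) + 1) = ((k : Nat) : Int) := by omega
    rw [he, PySem.List.slice_from _ (by omega)]
    have ht : ((k : Nat) : Int).toNat = k := by omega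
    rw [ht, ← List.map_drop, takeRes_drop]
  simp only [List.reverse_nil, List.nil_append]
  rw [hslice, join_ofList, join_ofList]
  rfl

theorem extract_ans_alt_eq_bcore (s : String) :
    extract_ans_alt s = (String.ofList (bcore ("answer is".toList) s.toList).1,
                         String.ofList (bcore ("answer is".toList) s.toList).2) := by
  unfold extract_ans_alt bcore
  dsimp only
  rw [PySem.Str.find_eq]
  have hlit : ("answer is".toList) = (['a','n','s','w','e','r',' ','i','s'] : List Char) := rfl
  rw [hlit]
  by_cases h1 : PySem.Chars.find s.toList (['a','n','s','w','e','r',' ','i','s'] : List Char) = -1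
  · simp [h1, String.ofList_toList]
  · simp only [h1, if_false]
    rw [PySem.Str.findFrom_eq]
    have hnlc : ("\n" : String).toList = ['\n'] := rfl
    rw [hnlc]
    by_cases h2 : PySem.Chars.findFrom s.toList ['\n']
        (PySem.Chars.find s.toList (['a','n','s','w','e','r',' ','i','s'] : List Char)) = -1
    · simp [h2, String.ofList_toList]
    · simp only [h2, if_false]
      have hpge : 0 ≤ PySem.Chars.find s.toList (['a','n','s','w','e','r',' ','i','s'] : List Char) := by
        have := PySem.Chars.neg_one_le_find s.toList (['a','n','s','w','e','r',' ','i','s'] : List Char); omega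
      have hple := PySem.Chars.find_le_length s.toList (['a','n','s','w','e','r',' ','i','s'] : List Char)
      have he : PySem.Chars.find s.toList (['a','n','s','w','e','r',' ','i','s'] : List Char)
          = (((PySem.Chars.find s.toList (['a','n','s','w','e','r',' ','i','s'] : List Char)).toNat : Nat) : Int) := by omega
      have hchar := PySem.Chars.findFrom_natCast s.toList ['\n']
        (PySem.Chars.find s.toList (['a','n','s','w','e','r',' ','i','s'] : List Char)).toNat (by omega)
      rw [← he] at hchar
      have hf := PySem.Chars.neg_one_le_find
        (List.drop (PySem.Chars.find s.toList (['a','n','s','w','e','r',' ','i','s'] : List Char)).toNat s.toList) ['\n']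
      have hqge : 0 ≤ PySem.Chars.findFrom s.toList ['\n']
          (PySem.Chars.find s.toList (['a','n','s','w','e','r',' ','i','s'] : List Char)) := by
        by_cases hcond : PySem.Chars.find
            (List.drop (PySem.Chars.find s.toList (['a','n','s','w','e','r',' ','i','s'] : List Char)).toNat s.toList) ['\n'] = -1
        · rw [hchar, if_pos hcond] at h2; exact absurd rfl h2
        · rw [hchar, if_neg hcond]; omega
      simp only [Prod.mk.injEq]
      refine ⟨?_, ?_⟩
      · apply str_ext
        rw [PySem.Str.toList_slice, String.toList_ofList,
          PySem.Chars.slice_eq_listSlice, PySem.List.slice_to _ hqge]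
      · apply str_ext
        rw [PySem.Str.toList_slice, String.toList_ofList,
          PySem.Chars.slice_eq_listSlice, PySem.List.slice_from _ (by omega)]
        have ht : (PySem.Chars.findFrom s.toList ['\n']
            (PySem.Chars.find s.toList (['a','n','s','w','e','r',' ','i','s'] : List Char)) + 1).toNat
            = (PySem.Chars.findFrom s.toList ['\n']
            (PySem.Chars.find s.toList (['a','n','s','w','e','r',' ','i','s'] : List Char))).toNat + 1 := by omega
        rw [ht]

theorem extract_ans_eq_alt (s : String) : extract_ans s = extract_ans_alt s := by
  rw [extract_ans_eq_acore, extract_ans_alt_eq_bcore,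
    main_acore_bcore ("answer is".toList) (by decide) (by decide)]

-- ===== VERDICT (by name: the statement is the Claim_ definition above) =====
theorem extract_ans_spec : Claim_equal_extract_ans := by
  intro s _
  unfold Spec_extract_ans
  exact extract_ans_eq_alt s
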